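-- pv_equiv track=rewrite | github.com/sameerSyedNadeem/First-Programming-Project-LOGIC-DOTS | supporting work/thebeauty.py | inRow
-- ===== SOURCE A (Python) =====
-- def getPositions(board,color):
--     pos=[]
--     for i in range(len(board)):
--         for j in range(len(board[i])):
--             if board[i][j] == color:
--                 pos.append((i,j))
--     return pos
--
-- def inRow(board, pos, color, N, isTrue=True):
--     pos1=getPositions(board, color)
--     row=100
--     if isTrue:
--         if pos=='top':
--             row=0
--         elif pos=='bottom':
--             row=2
--         elif pos=='middle':
--             row=1
--         occurs=0
--         for i in range(len(pos1)):
--             if pos1[i][0]==row: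
--                 occurs+=1
--         if occurs>=N:
--             return True
--         else:
--             return False
--     else:
--        return not inRow(board, pos, color, N)
-- ===== SOURCE B (Python) =====
-- def inRow(board, pos, color, N, isTrue=True):
--     row = {'top': 0, 'middle': 1, 'bottom': 2}.get(pos, 100)
--     occurs = sum(1 for c in board[row] if c == color) if row < len(board) else 0
--     return (occurs >= N) == isTrue
-- ===== Notes on version B (the rewrite author's own statement) =====
-- stated objective: simpler
-- what changed: Replaced the gather-all-positions-then-filter pass (getPositions over the whole board plus an index loop re-counting matches) and the boolean self-recursion by a direct one-row count: map pos to a row index, count the color in that single row, and compare the count with N, folding isTrue in with one equality.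
import Mathlib
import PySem

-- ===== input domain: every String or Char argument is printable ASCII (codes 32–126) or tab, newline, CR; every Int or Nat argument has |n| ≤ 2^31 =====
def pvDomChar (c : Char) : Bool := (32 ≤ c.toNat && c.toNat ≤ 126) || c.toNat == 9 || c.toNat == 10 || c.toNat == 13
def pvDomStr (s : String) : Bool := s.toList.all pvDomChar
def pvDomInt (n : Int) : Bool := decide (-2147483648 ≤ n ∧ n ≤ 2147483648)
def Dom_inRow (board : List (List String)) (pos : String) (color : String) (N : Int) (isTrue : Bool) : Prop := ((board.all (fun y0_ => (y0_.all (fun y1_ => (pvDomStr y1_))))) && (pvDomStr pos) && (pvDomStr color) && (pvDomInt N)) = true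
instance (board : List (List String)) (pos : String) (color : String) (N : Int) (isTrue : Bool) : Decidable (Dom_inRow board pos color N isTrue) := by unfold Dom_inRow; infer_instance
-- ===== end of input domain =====

-- B replaces A's whole-board position gathering + re-count + boolean self-recursion by a
-- direct count of the color in the single addressed row, compared with N (objective: simpler).

-- ===== PORT A =====
def getPositions (board : List (List String)) (color : String) : List (Int × Int) :=
  (PySem.List.pyRange 0 (board.length : Int) 1).foldl (fun pos i =>
    (PySem.List.pyRange 0 ((PySem.List.pyGetD board i []).length : Int) 1).foldl (fun pos j =>
      if PySem.List.pyGetD (PySem.List.pyGetD board i []) j "" == color then pos ++ [(i, j)] else pos)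
      pos) []

def inRow (board : List (List String)) (pos : String) (color : String) (N : Int) (isTrue : Bool) : Bool :=
  if isTrue then
    let pos1 := getPositions board color
    let row : Int := if pos = "top" then 0 else if pos = "bottom" then 2 else if pos = "middle" then 1 else 100
    let occurs : Int :=
      (PySem.List.pyRange 0 (pos1.length : Int) 1).foldl
        (fun occ i => if (PySem.List.pyGetD pos1 i ((0 : Int), (0 : Int))).1 == row then occ + 1 else occ) 0
    decide (N ≤ occurs)
  else
    !(inRow board pos color N true)
termination_by (if isTrue then 0 else 1)
decreasing_by simp [*]

-- ===== PORT B =====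
def inRow_alt (board : List (List String)) (pos : String) (color : String) (N : Int) (isTrue : Bool) : Bool :=
  let row : Int := if pos = "top" then 0 else if pos = "middle" then 1 else if pos = "bottom" then 2 else 100
  let occurs : Int :=
    if row < (board.length : Int) then ((board.getD row.toNat []).countP (fun c => c == color) : Int) else 0
  decide (N ≤ occurs) == isTrue

-- ===== PRECONDITION & SPEC =====
def Spec_inRow (board : List (List String)) (pos : String) (color : String) (N : Int) (isTrue : Bool) (out : Bool) : Prop := out = inRow_alt board pos color N isTrue
instance (board : List (List String)) (pos : String) (color : String) (N : Int) (isTrue : Bool) (out : Bool) : Decidable (Spec_inRow board pos color N isTrue out) := by unfold Spec_inRow; infer_instance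

-- ===== CLAIM (what is proved, stated in full; the proofs are below) =====
def Claim_equal_inRow : Prop := ∀ (board : List (List String)) (pos : String) (color : String) (N : Int) (isTrue : Bool), Dom_inRow board pos color N isTrue → Spec_inRow board pos color N isTrue (inRow board pos color N isTrue)

-- ===== LEMMAS AND PROOFS =====

-- A's gathered position list, flattened per row: in row i, the column indices holding the color
theorem getPositions_eq (board : List (List String)) (color : String) :
    getPositions board color
      = (PySem.List.pyRange 0 (board.length : Int) 1).flatMap (fun i =>
          ((PySem.List.pyRange 0 ((PySem.List.pyGetD board i []).length : Int) 1).filter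
              (fun j => PySem.List.pyGetD (PySem.List.pyGetD board i []) j "" == color)).map
            (fun j => (i, j))) := by
  unfold getPositions
  simp only [PySem.List.foldl_append_if, PySem.List.foldl_append_eq_flatMap, List.nil_append]

-- a sum of one-hot terms over range(0, n) picks out the term at r (0 if r is out of range)
theorem sum_ite_pyRange (n r : Int) (c : Int → Nat) :
    (((PySem.List.pyRange 0 n 1).map (fun i => if i = r then c i else 0)).sum)
      = if 0 ≤ r ∧ r < n then c r else 0 := by
  by_cases h : 0 ≤ r ∧ r < n
  · rw [PySem.List.pyRange_one_append 0 r n h.1 (le_of_lt h.2),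
        PySem.List.pyRange_one_cons h.2]
    rw [if_pos h]
    simp only [List.map_append, List.sum_append, List.map_cons, List.sum_cons]
    have h1 : (((PySem.List.pyRange 0 r 1).map (fun i => if i = r then c i else 0)).sum) = 0 := by
      apply List.sum_eq_zero; intro x hx
      rcases List.mem_map.1 hx with ⟨i, hi, rfl⟩
      rw [PySem.List.mem_pyRange_one] at hi
      simp [show i ≠ r by omega]
    have h2 : (((PySem.List.pyRange (r+1) n 1).map (fun i => if i = r then c i else 0)).sum) = 0 := by
      apply List.sum_eq_zero; intro x hx
      rcases List.mem_map.1 hx with ⟨i, hi, rfl⟩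
      rw [PySem.List.mem_pyRange_one] at hi
      simp [show i ≠ r by omega]
    simp [h1, h2]
  · rw [if_neg h]
    apply List.sum_eq_zero; intro x hx
    rcases List.mem_map.1 hx with ⟨i, hi, rfl⟩
    rw [PySem.List.mem_pyRange_one] at hi
    simp [show i ≠ r by omega]

-- counting pairs of getPositions with first component r = counting the color in row r
theorem count_getPositions (board : List (List String)) (color : String) (r : Int) :
    ((getPositions board color).countP (fun p => p.1 == r))
      = if 0 ≤ r ∧ r < (board.length : Int)
          then ((board.getD r.toNat []).countP (fun c => c == color)) else 0 := by
  rw [getPositions_eq]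
  have hflat : ∀ (l : List Int) (g : Int → List (Int × Int)) (p : Int × Int → Bool),
      (l.flatMap g).countP p = (l.map (fun i => (g i).countP p)).sum := by
    intro l g p
    induction l with
    | nil => simp
    | cons a t ih => simp [List.flatMap_cons, List.countP_append, ih]
  rw [hflat]
  have hblock : ∀ i : Int,
      (((PySem.List.pyRange 0 ((PySem.List.pyGetD board i []).length : Int) 1).filter
          (fun j => PySem.List.pyGetD (PySem.List.pyGetD board i []) j "" == color)).map
        (fun j => ((i : Int), j))).countP (fun p => p.1 == r)
      = if i = r then (PySem.List.pyGetD board i []).countP (fun c => c == color) else 0 := by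
    intro i
    rw [List.countP_map]
    by_cases h : i = r
    · subst h
      simp only [Function.comp_def, beq_self_eq_true, List.countP_true]
      conv_rhs => rw [← PySem.List.map_pyGetD_pyRange_zero' (xs := PySem.List.pyGetD board i []) (d := "")]
      rw [List.countP_map, List.countP_eq_length_filter]
      rfl
    · simp [Function.comp_def, h]
  simp only [hblock]
  rw [sum_ite_pyRange (board.length : Int) r (fun i => (PySem.List.pyGetD board i []).countP (fun c => c == color))]
  by_cases h : 0 ≤ r ∧ r < (board.length : Int)
  · rw [if_pos h, if_pos h]
    rw [PySem.List.pyGetD_eq_getElem (xs := board) (d := []) h.1 h.2]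
    rw [List.getD_eq_getElem _ _ (by omega)]
  · rw [if_neg h, if_neg h]

-- A's occurs loop is a countP over getPositions
theorem occursA_eq (board : List (List String)) (color : String) (row : Int) :
    ((PySem.List.pyRange 0 ((getPositions board color).length : Int) 1).foldl
        (fun occ i => if (PySem.List.pyGetD (getPositions board color) i ((0:Int),(0:Int))).1 == row then occ + 1 else occ) (0:Int))
    = (((getPositions board color).countP (fun p => p.1 == row) : Nat) : Int) := by
  rw [PySem.List.foldl_pyRange_zero_pyGetD' (getPositions board color) ((0:Int),(0:Int))
        (fun occ p => if p.1 == row then occ + 1 else occ) 0]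
  rw [PySem.List.foldl_if_add_one]
  simp

theorem inRow_true_eq (board : List (List String)) (pos : String) (color : String) (N : Int) :
    inRow board pos color N true = inRow_alt board pos color N true := by
  rw [inRow, inRow_alt]
  simp only [if_pos rfl]
  rw [occursA_eq]
  have hrow : (if pos = "top" then (0:Int) else if pos = "bottom" then 2 else if pos = "middle" then 1 else 100)
      = (if pos = "top" then 0 else if pos = "middle" then 1 else if pos = "bottom" then 2 else 100) := by
    split_ifs <;> simp_all
  rw [hrow]
  set row : Int := if pos = "top" then (0:Int) else if pos = "middle" then 1 else if pos = "bottom" then 2 else 100 with hr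
  have hnn : 0 ≤ row := by rw [hr]; split_ifs <;> omega
  simp only [count_getPositions, Nat.cast_ite, Nat.cast_zero]
  have hp : (0 ≤ row ∧ row < (board.length : Int)) = (row < (board.length : Int)) :=
    propext ⟨fun h => h.2, fun h => ⟨hnn, h⟩⟩
  simp [hp]

-- ===== VERDICT (by name: the statement is the Claim_ definition above) =====
theorem inRow_spec : Claim_equal_inRow := by
  intro board pos color N isTrue _
  unfold Spec_inRow
  cases isTrue
  · rw [inRow]
    simp only [Bool.false_eq_true, if_false]
    rw [inRow_true_eq, inRow_alt, inRow_alt]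
    cases decide (N ≤ _) <;> simp
  · exact inRow_true_eq board pos color N
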